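-- pv_equiv track=rewrite | github.com/softkleenex/arc-prize-2025-gold | hybrid_solver.py | apply_copy_rule
-- ===== SOURCE A (Python) =====
-- from typing import List, Dict, Tuple, Callable, Optional
--
-- def apply_copy_rule(grid: List[List], params: Dict) -> List[List]:
--     """Apply copy rule"""
--     factor_h = params.get('factor_h', 2)
--     factor_w = params.get('factor_w', 2)
--
--     h, w = len(grid), len(grid[0])
--     result = [[0] * (w * factor_w) for _ in range(h * factor_h)]
--
--     for rep_h in range(factor_h):
--         for rep_w in range(factor_w):
--             for i in range(h):
--                 for j in range(w):
--                     result[rep_h * h + i][rep_w * w + j] = grid[i][j]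
--
--     return result
-- ===== SOURCE B (Python) =====
-- def apply_copy_rule(grid, params):
--     """Apply copy rule"""
--     factor_h = params.get('factor_h', 2)
--     factor_w = params.get('factor_w', 2)
--     w = len(grid[0])
--     return [row[:w] * factor_w for _ in range(factor_h) for row in grid]
-- ===== Notes on version B (the rewrite author's own statement) =====
-- stated objective: simpler
-- what changed: Replaces the preallocated zero matrix and four nested index-assignment loops by a single nested comprehension that emits each output row directly as row[:w] * factor_w (w = the grid's width, len(grid[0])), repeated factor_h times.
import Mathlib
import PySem

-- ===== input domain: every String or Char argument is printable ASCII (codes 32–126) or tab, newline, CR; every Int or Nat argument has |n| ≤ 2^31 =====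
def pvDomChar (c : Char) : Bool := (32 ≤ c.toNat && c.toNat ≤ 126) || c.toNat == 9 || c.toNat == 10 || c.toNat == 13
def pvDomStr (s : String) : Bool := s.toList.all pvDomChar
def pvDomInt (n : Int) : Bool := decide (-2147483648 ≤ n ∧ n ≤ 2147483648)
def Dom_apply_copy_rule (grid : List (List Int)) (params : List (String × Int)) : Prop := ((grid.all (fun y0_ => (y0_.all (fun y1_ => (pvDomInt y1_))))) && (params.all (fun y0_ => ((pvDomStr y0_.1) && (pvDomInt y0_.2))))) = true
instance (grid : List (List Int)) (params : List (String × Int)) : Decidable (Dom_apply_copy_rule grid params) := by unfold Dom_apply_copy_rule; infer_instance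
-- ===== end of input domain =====

-- B replaces A's preallocated zero matrix and four nested index-assignment loops by a
-- nested comprehension emitting each output row directly (objective: simpler).

-- ===== PORT A =====
def apply_copy_rule (grid : List (List Int)) (params : List (String × Int)) : List (List Int) :=
  let factor_h := PySem.Dict.getD (PySem.Dict.mk params) "factor_h" 2
  let factor_w := PySem.Dict.getD (PySem.Dict.mk params) "factor_w" 2
  let h : Int := grid.length
  let w : Int := (PySem.List.pyGetD grid 0 []).length
  let result : List (List Int) :=
    (PySem.List.pyRange 0 (h * factor_h) 1).map (fun _ => PySem.List.pyRepeat [(0 : Int)] (w * factor_w))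
  (PySem.List.pyRange 0 factor_h 1).foldl (fun result rep_h =>
    (PySem.List.pyRange 0 factor_w 1).foldl (fun result rep_w =>
      (PySem.List.pyRange 0 h 1).foldl (fun result i =>
        (PySem.List.pyRange 0 w 1).foldl (fun result j =>
          PySem.List.pySetD result (rep_h * h + i)
            (PySem.List.pySetD (PySem.List.pyGetD result (rep_h * h + i) [])
              (rep_w * w + j)
              (PySem.List.pyGetD (PySem.List.pyGetD grid i []) j 0)))
          result) result) result) result

-- ===== PORT B =====
def apply_copy_rule_alt (grid : List (List Int)) (params : List (String × Int)) : List (List Int) :=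
  let factor_h := PySem.Dict.getD (PySem.Dict.mk params) "factor_h" 2
  let factor_w := PySem.Dict.getD (PySem.Dict.mk params) "factor_w" 2
  let w : Int := (PySem.List.pyGetD grid 0 []).length
  (PySem.List.pyRange 0 factor_h 1).flatMap (fun _ =>
    grid.map (fun row => PySem.List.pyRepeat (PySem.List.slice row none (some w)) factor_w))

-- ===== PRECONDITION & SPEC =====
-- Pre_ excludes exactly the inputs on which A raises IndexError: the empty grid
-- (len(grid[0])), and grids with a row shorter than the first row when both factors are
-- positive (grid[i][j] with j up to len(grid[0]) - 1 then goes out of range).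
def Pre_apply_copy_rule (grid : List (List Int)) (params : List (String × Int)) : Prop :=
  grid ≠ [] ∧
    (1 ≤ PySem.Dict.getD (PySem.Dict.mk params) "factor_h" 2 →
     1 ≤ PySem.Dict.getD (PySem.Dict.mk params) "factor_w" 2 →
     ∀ row ∈ grid, grid.headI.length ≤ row.length)
instance (grid : List (List Int)) (params : List (String × Int)) : Decidable (Pre_apply_copy_rule grid params) := by unfold Pre_apply_copy_rule; infer_instance
def pvWitness_apply_copy_rule : List (List Int) × (List (String × Int)) :=
  ([[1, 2], [3, 4]], [("factor_h", 3)])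

def Spec_apply_copy_rule (grid : List (List Int)) (params : List (String × Int)) (out : List (List Int)) : Prop := out = apply_copy_rule_alt grid params
instance (grid : List (List Int)) (params : List (String × Int)) (out : List (List Int)) : Decidable (Spec_apply_copy_rule grid params out) := by unfold Spec_apply_copy_rule; infer_instance

-- ===== CLAIM (what is proved, stated in full; the proofs are below) =====
def Claim_equal_apply_copy_rule : Prop := ∀ (grid : List (List Int)) (params : List (String × Int)), Dom_apply_copy_rule grid params → Pre_apply_copy_rule grid params → Spec_apply_copy_rule grid params (apply_copy_rule grid params)

-- ===== LEMMAS AND PROOFS =====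

lemma toNat_natCast_mul (H : Nat) (x : Int) : ((H : Int) * x).toNat = H * x.toNat := by
  cases x with
  | ofNat n => rw [Int.ofNat_eq_natCast, ← Nat.cast_mul, Int.toNat_natCast, Int.toNat_natCast]
  | negSucc n =>
    have h1 : ((H : Int) * Int.negSucc n).toNat = 0 := by
      apply Int.toNat_of_nonpos
      apply mul_nonpos_of_nonneg_of_nonpos (by positivity)
      exact le_of_lt (Int.negSucc_lt_zero n)
    simp [h1]

lemma set_take_succ {T : Type} (row : List T) (o : Nat) (x : T) (ho : o < row.length) :
    (row.set o x).take (o+1) = row.take o ++ [x] := by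
  rw [List.set_eq_take_append_cons_drop, if_pos ho]
  rw [List.take_append]
  simp [Nat.min_eq_left (le_of_lt ho), List.take_succ_cons,
        Nat.sub_eq_zero_of_le, List.length_take, le_of_lt ho]

lemma fill_row (src : List Int) : ∀ (row : List Int) (o : Nat), o + src.length ≤ row.length →
    (List.range src.length).foldl (fun r j => r.set (o + j) (src.getD j 0)) row
      = row.take o ++ src ++ row.drop (o + src.length) := by
  induction src with
  | nil => intro row o _; simp
  | cons x xs ih =>
    intro row o hle
    have ho : o < row.length := by simp at hle; omega
    simp only [List.length_cons]
    rw [List.range_succ_eq_map, List.foldl_cons, List.foldl_map]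
    have hfun : (fun (r : List Int) (j : Nat) => r.set (o + (j + 1)) ((x :: xs).getD (j + 1) 0))
        = (fun (r : List Int) (j : Nat) => r.set ((o + 1) + j) (xs.getD j 0)) := by
      funext r j
      have h : o + (j + 1) = (o + 1) + j := by omega
      rw [h, List.getD_cons_succ]
    rw [Nat.add_zero, List.getD_cons_zero, hfun,
        ih (row.set o x) (o + 1) (by simp at hle ⊢; omega)]
    rw [set_take_succ row o x ho, List.drop_set_of_lt (by omega)]
    have h2 : o + 1 + xs.length = o + (xs.length + 1) := by omega
    rw [h2]
    simp

lemma foldl_set_row {β : Type} (js : List β) (g : List Int → β → List Int) :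
    ∀ (res : List (List Int)) (r : Nat), r < res.length →
    js.foldl (fun acc j => acc.set r (g (acc.getD r []) j)) res
      = res.set r (js.foldl g (res.getD r [])) := by
  induction js with
  | nil => intro res r hr; simp [List.getD, List.getElem?_eq_getElem hr]
  | cons j js ih =>
    intro res r hr
    rw [List.foldl_cons, ih _ r (by simpa using hr), List.foldl_cons]
    rw [show ((res.set r (g (res.getD r []) j)).getD r []) = g (res.getD r []) j by
      simp [List.getD, List.getElem?_eq_getElem, hr]]
    rw [List.set_set]

lemma fill_block : ∀ (n : Nat) (F : Nat → List Int → List Int) (o : Nat) (res : List (List Int)), o + n ≤ res.length →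
    (List.range n).foldl (fun res i => res.set (o + i) (F i (res.getD (o + i) []))) res
      = res.take o ++ (List.range n).map (fun i => F i (res.getD (o + i) [])) ++ res.drop (o + n) := by
  intro n
  induction n with
  | zero => intro F o res _; simp
  | succ n ih =>
    intro F o res hle
    have ho : o < res.length := by omega
    rw [List.range_succ_eq_map, List.foldl_cons, List.foldl_map, List.map_cons, List.map_map]
    have hfun : (fun (res : List (List Int)) (i : Nat) => res.set (o + (i + 1)) (F (i + 1) (res.getD (o + (i + 1)) [])))
        = (fun (res : List (List Int)) (i : Nat) => res.set ((o + 1) + i) ((fun i => F (i + 1)) i (res.getD ((o + 1) + i) []))) := by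
      funext res i
      have h : o + (i + 1) = (o + 1) + i := by omega
      rw [h]
    rw [Nat.add_zero, hfun,
        ih (fun i => F (i + 1)) (o + 1) (res.set o (F 0 (res.getD o []))) (by simp; omega)]
    rw [set_take_succ res o _ ho, List.drop_set_of_lt (by omega)]
    have h2 : o + 1 + n = o + (n + 1) := by omega
    rw [h2]
    have h3 : ∀ i : Nat, ((res.set o (F 0 (res.getD o []))).getD ((o+1) + i) []) = res.getD ((o+1)+i) [] := by
      intro i
      simp [List.getD, List.getElem?_set_ne (by omega : o ≠ o+1+i)]
    simp only [h3]
    simp only [List.map_map, Function.comp_def]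
    simp
    intro a _
    rw [show o + 1 + a = o + (a + 1) by omega]


lemma foldl_congr_inv {α β : Type} (l : List β) (f g : α → β → α) (Inv : α → Prop) (init : α)
    (hinit : Inv init) (hpres : ∀ a, Inv a → ∀ b ∈ l, Inv (f a b))
    (heq : ∀ a, Inv a → ∀ b ∈ l, f a b = g a b) :
    l.foldl f init = l.foldl g init := by
  induction l generalizing init with
  | nil => rfl
  | cons x xs ih =>
    simp only [List.foldl_cons]
    rw [← heq init hinit x (by simp)]
    exact ih (f init x) (hpres init hinit x (by simp))
      (fun a ha b hb => hpres a ha b (by simp [hb]))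
      (fun a ha b hb => heq a ha b (by simp [hb]))

lemma len_flatten_replicate {α : Type} (k : Nat) (l : List α) :
    (List.replicate k l).flatten.length = k * l.length := by
  induction k with
  | zero => simp
  | succ k ih => simp [List.replicate_succ, ih]; ring

def blockRow (W fw k : Nat) (row : List Int) : List Int :=
  (List.replicate k row).flatten ++ List.replicate ((fw - k) * W) 0

lemma wloop (g : List (List Int)) (W : Nat) (hrect : ∀ row ∈ g, row.length = W) (fw : Nat) :
    ∀ (k : Nat), k ≤ fw → ∀ (o : Nat) (P Q : List (List Int)), P.length = o →
    (List.range k).foldl (fun res b =>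
      (List.range g.length).foldl (fun res i =>
        (List.range W).foldl (fun res j =>
          res.set (o + i) ((res.getD (o + i) []).set (b * W + j) ((g.getD i []).getD j 0))) res) res)
      (P ++ g.map (blockRow W fw 0) ++ Q)
    = P ++ g.map (blockRow W fw k) ++ Q := by
  intro k
  induction k with
  | zero => intro _ o P Q _; simp
  | succ k ih =>
    intro hk o P Q hP
    subst hP
    rw [List.range_succ, List.foldl_append, ih (by omega) P.length P Q rfl, List.foldl_cons, List.foldl_nil]
    set L := P.length + g.length + Q.length with hL
    have hlen : ∀ (X : List (List Int)), (P ++ g.map (blockRow W fw X.length) ++ Q).length = L := by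
      intro X; simp [hL]; omega
    -- replace the inner j-fold by a single row update
    have hrow : ∀ (res : List (List Int)), res.length = L → ∀ i ∈ List.range g.length,
        (List.range W).foldl (fun res j =>
          res.set (P.length + i) ((res.getD (P.length + i) []).set (k * W + j) ((g.getD i []).getD j 0))) res
        = res.set (P.length + i) ((List.range W).foldl (fun row j =>
            row.set (k * W + j) ((g.getD i []).getD j 0)) (res.getD (P.length + i) [])) := by
      intro res hres i hi
      simp only [List.mem_range] at hi
      exact foldl_set_row (List.range W)
        (fun row j => row.set (k * W + j) ((g.getD i []).getD j 0))
        res (P.length + i) (by rw [hres, hL]; omega)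
    rw [foldl_congr_inv (List.range g.length) _
      (fun res i => res.set (P.length + i) ((List.range W).foldl (fun row j =>
          row.set (k * W + j) ((g.getD i []).getD j 0)) (res.getD (P.length + i) [])))
      (fun res => res.length = L) _ (by simp [hL]; omega)
      (fun a ha b hb => by rw [hrow a ha b hb]; simp [ha])
      hrow]
    rw [fill_block g.length (fun i row => (List.range W).foldl (fun row j =>
          row.set (k * W + j) ((g.getD i []).getD j 0)) row) P.length
        (P ++ g.map (blockRow W fw k) ++ Q) (by simp)]
    have htake : (P ++ g.map (blockRow W fw k) ++ Q).take P.length = P := by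
      rw [List.append_assoc, List.take_left]
    have hdrop : (P ++ g.map (blockRow W fw k) ++ Q).drop (P.length + g.length) = Q := by
      rw [show P.length + g.length = (P ++ g.map (blockRow W fw k)).length by simp, List.drop_left]
    rw [htake, hdrop]
    congr 1
    congr 1
    -- the middle H rows
    apply List.ext_getElem (by simp)
    intro i h1 h2
    have hi : i < g.length := by simpa using h2
    have hgetrow : (P ++ g.map (blockRow W fw k) ++ Q).getD (P.length + i) [] = blockRow W fw k g[i] := by
      rw [List.append_assoc]
      have h3 : i < (g.map (blockRow W fw k)).length := by simpa using hi
      simp [List.getD, List.getElem?_append_right (by omega : P.length ≤ P.length + i),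
            List.getElem?_append_left h3, List.getElem?_eq_getElem hi]
    simp only [List.getElem_map, List.getElem_range]
    rw [hgetrow]
    have hWi : (g.getD i []).length = W := by
      rw [List.getD_eq_getElem _ _ hi]; exact hrect _ (List.getElem_mem hi)
    have hflatlen : ((List.replicate k g[i]).flatten).length = k * W := by
      rw [len_flatten_replicate, hrect _ (List.getElem_mem hi)]
    have hrowlen : (blockRow W fw k g[i]).length = k * W + (fw - k) * W := by
      simp [blockRow, hflatlen]
    rw [show (List.range W).foldl (fun row j => row.set (k * W + j) ((g.getD i []).getD j 0))
          (blockRow W fw k g[i])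
        = (List.range (g.getD i []).length).foldl (fun row j =>
            row.set (k * W + j) ((g.getD i []).getD j 0)) (blockRow W fw k g[i]) by rw [hWi]]
    have hWle : k * W + W ≤ k * W + (fw - k) * W :=
      Nat.add_le_add_left (Nat.le_mul_of_pos_left W (by omega : 0 < fw - k)) _
    rw [fill_row (g.getD i []) _ (k * W) (by rw [hWi, hrowlen]; exact hWle)]
    rw [hWi]
    unfold blockRow
    rw [List.take_append_of_le_length (le_of_eq hflatlen.symm),
        show (List.replicate k g[i]).flatten.take (k*W) = (List.replicate k g[i]).flatten by
          rw [List.take_of_length_le (by rw [hflatlen])]]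
    rw [show k * W + W = (List.replicate k g[i]).flatten.length + W by rw [hflatlen]]
    rw [List.drop_append]
    rw [List.drop_eq_nil_of_le (by omega : (List.replicate k g[i]).flatten.length ≤ (List.replicate k g[i]).flatten.length + W)]
    rw [show (List.replicate k g[i]).flatten.length + W - (List.replicate k g[i]).flatten.length = W by omega]
    rw [List.drop_replicate]
    rw [show (fw - k) * W - W = (fw - (k + 1)) * W by
      rw [Nat.sub_mul, Nat.sub_mul, Nat.add_mul, Nat.one_mul, Nat.sub_sub]]
    rw [show (g.getD i []) = g[i] from List.getD_eq_getElem _ _ hi]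
    rw [show (List.replicate (k+1) g[i]).flatten = (List.replicate k g[i]).flatten ++ g[i] by
      rw [List.replicate_succ', List.flatten_append]; simp]
    simp [blockRow, List.append_assoc]

lemma hloop (g : List (List Int)) (W : Nat) (hrect : ∀ row ∈ g, row.length = W) (fw fh : Nat) :
    ∀ (k : Nat), k ≤ fh →
    (List.range k).foldl (fun res a =>
      (List.range fw).foldl (fun res b =>
        (List.range g.length).foldl (fun res i =>
          (List.range W).foldl (fun res j =>
            res.set (a * g.length + i) ((res.getD (a * g.length + i) []).set (b * W + j) ((g.getD i []).getD j 0))) res) res) res)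
      (List.replicate (fh * g.length) (List.replicate (fw * W) 0))
    = (List.replicate k (g.map (fun row => (List.replicate fw row).flatten))).flatten
      ++ List.replicate ((fh - k) * g.length) (List.replicate (fw * W) 0) := by
  intro k
  induction k with
  | zero => simp
  | succ k ih =>
    intro hk
    rw [List.range_succ, List.foldl_append, ih (by omega), List.foldl_cons, List.foldl_nil]
    have hsplit : List.replicate ((fh - k) * g.length) (List.replicate (fw * W) (0:Int))
        = List.replicate g.length (List.replicate (fw * W) (0:Int))
          ++ List.replicate ((fh - (k + 1)) * g.length) (List.replicate (fw * W) (0:Int)) := by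
      rw [← List.replicate_add]
      congr 1
      rw [show fh - k = 1 + (fh - (k + 1)) by omega, Nat.add_mul, Nat.one_mul]
    rw [hsplit]
    have hzero : List.replicate g.length (List.replicate (fw * W) (0:Int))
        = g.map (blockRow W fw 0) := by
      have hb : blockRow W fw 0 = fun (_ : List Int) => List.replicate (fw * W) (0:Int) := by
        funext row; simp [blockRow]
      rw [hb, List.map_const']
    rw [hzero]
    rw [show ∀ (A B C : List (List Int)), A ++ (B ++ C) = A ++ B ++ C from fun A B C => (List.append_assoc A B C).symm]
    have hP : ((List.replicate k (g.map (fun row => (List.replicate fw row).flatten))).flatten).length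
        = k * g.length := by rw [len_flatten_replicate]; simp
    rw [wloop g W hrect fw fw le_rfl (k * g.length) _ _ hP]
    rw [show g.map (blockRow W fw fw) = g.map (fun row => (List.replicate fw row).flatten) by
      apply List.map_congr_left; intro row _; simp [blockRow]]
    rw [show (List.replicate (k+1) (g.map (fun row => (List.replicate fw row).flatten))).flatten
        = (List.replicate k (g.map (fun row => (List.replicate fw row).flatten))).flatten
          ++ g.map (fun row => (List.replicate fw row).flatten) by
      rw [List.replicate_succ', List.flatten_append]; simp]

lemma foldl_self {α β : Type} (l : List β) (init : α) :
    l.foldl (fun acc _ => acc) init = init := by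
  induction l generalizing init with
  | nil => rfl
  | cons x xs ih => simpa using ih init

lemma flatten_replicate_replicate {α : Type} (k h : Nat) (x : α) :
    (List.replicate k (List.replicate h x)).flatten = List.replicate (k * h) x := by
  induction k with
  | zero => simp
  | succ k ih => rw [List.replicate_succ, List.flatten_cons, ih, ← List.replicate_add, Nat.succ_mul, Nat.add_comm]

lemma ports_agree (grid : List (List Int)) (params : List (String × Int))
    (hne : grid ≠ [])
    (hpre : 1 ≤ PySem.Dict.getD (PySem.Dict.mk params) "factor_h" 2 →
            1 ≤ PySem.Dict.getD (PySem.Dict.mk params) "factor_w" 2 →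
            ∀ row ∈ grid, grid.headI.length ≤ row.length) :
    apply_copy_rule grid params = apply_copy_rule_alt grid params := by
  obtain ⟨r0, rest, rfl⟩ := List.exists_cons_of_ne_nil hne
  simp only [List.headI_cons] at hpre
  simp only [apply_copy_rule, apply_copy_rule_alt]
  rw [PySem.List.pyGetD_zero_cons]
  simp only [PySem.List.pyRange_one, PySem.List.slice_to_natCast]
  simp only [List.foldl_map, List.flatMap_def, List.map_map, Int.sub_zero, zero_add,
             Int.toNat_natCast, Function.comp_def]
  set FH : Int := (PySem.Dict.mk params).getD "factor_h" 2 with hFH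
  set FW : Int := (PySem.Dict.mk params).getD "factor_w" 2 with hFW
  set H : Nat := (r0 :: rest).length with hH
  set W : Nat := r0.length with hW
  by_cases hfh : (1:Int) ≤ FH
  case neg =>
    -- factor_h ≤ 0: both sides are empty
    have h0 : FH.toNat = 0 := by omega
    have h1 : ((H:Int) * FH).toNat = 0 := by rw [toNat_natCast_mul, h0, Nat.mul_zero]
    simp [h0, h1]
  case pos =>
  by_cases hfw : (1:Int) ≤ FW
  case neg =>
    -- factor_w ≤ 0: every output row is empty on both sides
    have h0 : FW.toNat = 0 := by omega
    have h1 : ((W:Int) * FW).toNat = 0 := by rw [toNat_natCast_mul, h0, Nat.mul_zero]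
    simp only [h0, List.range_zero, List.foldl_nil, foldl_self]
    have hrep0 : ∀ x : List Int, PySem.List.pyRepeat x FW = [] := by
      intro x; simp [PySem.List.pyRepeat, h0]
    simp only [hrep0]
    rw [show (List.range ((H:Int) * FH).toNat).map
          (fun _ => PySem.List.pyRepeat [(0:Int)] ((W:Int) * FW))
        = List.replicate (FH.toNat * H) ([] : List Int) by
      rw [List.map_const', List.length_range, toNat_natCast_mul, Nat.mul_comm H,
          PySem.List.pyRepeat_singleton, h1, List.replicate_zero]]
    rw [show (List.range FH.toNat).map (fun _ => (r0 :: rest).map (fun _ => ([] : List Int)))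
        = List.replicate FH.toNat (List.replicate H ([] : List Int)) by
      rw [List.map_const', List.length_range, List.map_const']]
    rw [flatten_replicate_replicate]
  case pos =>
  have hrows : ∀ row ∈ r0 :: rest, W ≤ row.length := hpre hfh hfw
  -- replace the source grid by its rectangular cropping g'
  set g' : List (List Int) := (r0 :: rest).map (fun row => row.take W) with hg'
  have hrect : ∀ row ∈ g', row.length = W := by
    intro row hrow
    rw [hg'] at hrow
    obtain ⟨r, hr, rfl⟩ := List.mem_map.mp hrow
    simp [List.length_take, Nat.min_eq_left (hrows r hr)]
  have hlen' : g'.length = H := by rw [hg']; simp [hH]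
  -- the A-side fold reads only the first W entries of each row
  have hread : ∀ (l : List (List Int)) (i j : Nat), j < W →
      ((l.map (fun row => row.take W)).getD i []).getD j 0 = (l.getD i []).getD j 0 := by
    intro l i j hj
    rcases h : l[i]? with _ | r
    · simp [List.getD, List.getElem?_map, h]
    · simp [List.getD, List.getElem?_map, h, List.getElem?_take_of_lt hj]
  -- initial matrix is a replicate of zero rows
  rw [show (List.range ((H:Int) * FH).toNat).map (fun _ => PySem.List.pyRepeat [(0:Int)] ((W:Int) * FW))
      = List.replicate (FH.toNat * H) (List.replicate (FW.toNat * W) (0:Int)) by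
    rw [List.map_const', List.length_range, toNat_natCast_mul, PySem.List.pyRepeat_singleton,
        toNat_natCast_mul, Nat.mul_comm H, Nat.mul_comm W]]
  -- B is the tile of the cropped grid
  rw [show (List.range FH.toNat).map (fun _ => (r0 :: rest).map (fun row => PySem.List.pyRepeat (row.take W) FW))
      = List.replicate FH.toNat (g'.map (fun row => (List.replicate FW.toNat row).flatten)) by
    rw [List.map_const', List.length_range, hg', List.map_map]
    simp [PySem.List.pyRepeat, Function.comp_def]]
  -- convert the Int-indexed loop bodies to Nat-indexed ones
  have h1 : ∀ a b i : Nat, (fun (res : List (List Int)) (j : Nat) =>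
      PySem.List.pySetD res ((a:Int) * (H:Int) + (i:Int))
        (PySem.List.pySetD (PySem.List.pyGetD res ((a:Int) * (H:Int) + (i:Int)) [])
          ((b:Int) * (W:Int) + (j:Int))
          (PySem.List.pyGetD (PySem.List.pyGetD (r0 :: rest) (i:Int) []) ((j:Int)) 0)))
      = (fun (res : List (List Int)) (j : Nat) =>
        res.set (a * H + i) ((res.getD (a * H + i) []).set (b * W + j)
          (((r0 :: rest).getD i []).getD j 0))) := by
    intro a b i; funext res j
    rw [show ((a:Int) * (H:Int) + (i:Int)) = ((a * H + i : Nat) : Int) by push_cast; ring,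
        show ((b:Int) * (W:Int) + (j:Int)) = ((b * W + j : Nat) : Int) by push_cast; ring,
        PySem.List.pySetD_natCast, PySem.List.pyGetD_natCast, PySem.List.pySetD_natCast,
        PySem.List.pyGetD_natCast, PySem.List.pyGetD_natCast]
  have h2 : (fun (res : List (List Int)) (a : Nat) =>
      (List.range FW.toNat).foldl (fun res (b : Nat) =>
        (List.range H).foldl (fun res (i : Nat) =>
          (List.range W).foldl (fun res (j : Nat) =>
            PySem.List.pySetD res ((a:Int) * (H:Int) + (i:Int))
              (PySem.List.pySetD (PySem.List.pyGetD res ((a:Int) * (H:Int) + (i:Int)) [])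
                ((b:Int) * (W:Int) + (j:Int))
                (PySem.List.pyGetD (PySem.List.pyGetD (r0 :: rest) (i:Int) []) ((j:Int)) 0))) res) res) res)
      = (fun res (a : Nat) =>
      (List.range FW.toNat).foldl (fun res (b : Nat) =>
        (List.range H).foldl (fun res (i : Nat) =>
          (List.range W).foldl (fun res (j : Nat) =>
            res.set (a * H + i) ((res.getD (a * H + i) []).set (b * W + j)
              ((g'.getD i []).getD j 0))) res) res) res) := by
    funext res a
    simp only [h1]
    apply PySem.List.foldl_congr_mem
    intro acc b _
    apply PySem.List.foldl_congr_mem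
    intro acc2 i _
    apply PySem.List.foldl_congr_mem
    intro acc3 j hj
    rw [hg', hread (r0 :: rest) i j (List.mem_range.mp hj)]
  rw [h2]
  have hmain := hloop g' W hrect FW.toNat FH.toNat FH.toNat le_rfl
  rw [hlen'] at hmain
  rw [hmain]
  simp

-- ===== VERDICT (by name: the statement is the Claim_ definition above) =====
theorem apply_copy_rule_spec : Claim_equal_apply_copy_rule := by
  intro grid params _ hpre
  unfold Spec_apply_copy_rule
  exact ports_agree grid params hpre.1 hpre.2
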